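-- pv_equiv track=rewrite | github.com/Shweta-bit/Array- | find_permutation.py | findPerm
-- ===== SOURCE A (Python) =====
-- def findPerm(s, n):
--     max = n
--     min = 1
--     res = [None]*n
--     Stack = []
--     j = 0
--     for i in range(1,n):
--         if (s[i-1] == "I"):
--             Stack.append(i)
--             while(Stack):
--
--                 res[j] = Stack.pop()
--                 j += 1
--         else:
--             Stack.append(i)
--     Stack.append(n)
--     while(Stack):
--
--         res[j] = Stack.pop()
--         j +=1
--     return res
-- ===== SOURCE B (Python) =====
-- def findPerm(s, n):
--     # run-emission: for each 'I' at pattern position i, emit the pending block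
--     # start..i in descending order; finally emit the last block ending at n.
--     res = []
--     start = 1
--     for i in range(1, n):
--         if s[i-1] == "I":
--             res.extend(range(i, start - 1, -1))
--             start = i + 1
--     res.extend(range(n, start - 1, -1))
--     return res
-- ===== Notes on version B (the rewrite author's own statement) =====
-- stated objective: simpler
-- what changed: B replaces A's preallocated slot array plus explicit stack (pushed then popped element by element) with direct emission of each descending run via range(i, start-1, -1) tracked by a single start marker.
import Mathlib
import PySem

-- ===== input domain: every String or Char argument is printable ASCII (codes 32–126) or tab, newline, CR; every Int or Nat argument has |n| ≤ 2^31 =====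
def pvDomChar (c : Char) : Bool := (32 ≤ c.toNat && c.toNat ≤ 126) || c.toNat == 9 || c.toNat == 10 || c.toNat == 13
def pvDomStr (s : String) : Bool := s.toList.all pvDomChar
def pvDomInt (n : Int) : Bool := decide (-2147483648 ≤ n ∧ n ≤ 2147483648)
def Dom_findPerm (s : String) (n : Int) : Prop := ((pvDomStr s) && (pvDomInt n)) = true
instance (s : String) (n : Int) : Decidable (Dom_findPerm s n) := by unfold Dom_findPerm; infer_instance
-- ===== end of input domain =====

-- B emits each descending run directly from a start marker instead of A's explicit stack + preallocated slot array ("simpler").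

-- ===== PORT A =====
-- while Stack: res[j] = Stack.pop(); j += 1   (pop takes the LAST element, so the stack is written out reversed)
def pvFlushA (stack : List Int) (res : List (Option Int)) (j : Int) : List (Option Int) × Int :=
  stack.reverse.foldl (fun rj v => (rj.1.set rj.2.toNat (some v), rj.2 + 1)) (res, j)

-- body of A's "for i in range(1, n)": state = (res, Stack, j)
def pvStepA (cs : List Char) (st : List (Option Int) × List Int × Int) (i : Int) :
    List (Option Int) × List Int × Int :=
  if PySem.List.pyGetD cs (i - 1) 'D' == 'I' then   -- s[i-1]: in range under Pre_, default unreachable there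
    let fl := pvFlushA (st.2.1 ++ [i]) st.1 st.2.2
    (fl.1, [], fl.2)
  else
    (st.1, st.2.1 ++ [i], st.2.2)

def findPerm (s : String) (n : Int) : List Int :=
  let cs := s.toList
  let t := (PySem.List.pyRange 1 n 1).foldl (pvStepA cs) (List.replicate n.toNat none, [], 0)
  let fl := pvFlushA (t.2.1 ++ [n]) t.1 t.2.2
  fl.1.map (fun o => o.getD 0)   -- under Pre_ every slot has been written; unwrapping the Options is exact

-- ===== PORT B =====
-- body of B's "for i in range(1, n)": state = (res, start)
def pvStepB (cs : List Char) (st : List Int × Int) (i : Int) : List Int × Int :=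
  if PySem.List.pyGetD cs (i - 1) 'D' == 'I' then
    (st.1 ++ PySem.List.pyRange i (st.2 - 1) (-1), i + 1)
  else
    st

def findPerm_alt (s : String) (n : Int) : List Int :=
  let cs := s.toList
  let t := (PySem.List.pyRange 1 n 1).foldl (pvStepB cs) ([], 1)
  t.1 ++ PySem.List.pyRange n (t.2 - 1) (-1)

-- ===== PRECONDITION & SPEC =====
-- Pre_ is exactly where Python A returns: for n ≤ 0 the write res[0] hits the empty result list
-- (IndexError), and for len(s) < n-1 the read s[i-1] raises IndexError.
def Pre_findPerm (s : String) (n : Int) : Prop := 1 ≤ n ∧ n - 1 ≤ (s.toList.length : Int)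
instance (s : String) (n : Int) : Decidable (Pre_findPerm s n) := by unfold Pre_findPerm; infer_instance
def pvWitness_findPerm : String × Int := ("ID", 3)

def Spec_findPerm (s : String) (n : Int) (out : List Int) : Prop := out = findPerm_alt s n
instance (s : String) (n : Int) (out : List Int) : Decidable (Spec_findPerm s n out) := by unfold Spec_findPerm; infer_instance

-- ===== CLAIM (what is proved, stated in full; the proofs are below) =====
def Claim_equal_findPerm : Prop := ∀ (s : String) (n : Int), Dom_findPerm s n → Pre_findPerm s n → Spec_findPerm s n (findPerm s n)

-- ===== LEMMAS AND PROOFS =====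

-- flushing the stack writes its reverse into the next free slots of res
lemma pvFlush_go (l out : List Int) (k : Nat) (h : l.length ≤ k) :
    l.foldl (fun rj v => (rj.1.set rj.2.toNat (some v), rj.2 + 1))
      ((out.map some ++ List.replicate k none : List (Option Int)), (out.length : Int))
    = ((out ++ l).map some ++ List.replicate (k - l.length) none, (out.length : Int) + l.length) := by
  induction l generalizing out k with
  | nil => simp
  | cons v l ih =>
    obtain ⟨k', rfl⟩ : ∃ k', k = k' + 1 := ⟨k - 1, by simp at h; omega⟩
    simp only [List.foldl_cons]
    have h1 : ((out.map some ++ List.replicate (k' + 1) (none : Option Int)).set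
        (out.length : Int).toNat (some v), (out.length : Int) + 1)
        = (((out ++ [v]).map some ++ List.replicate k' none : List (Option Int)),
           ((out ++ [v]).length : Int)) := by
      simp [List.replicate_succ]
    rw [h1, ih (out ++ [v]) k' (by simp at h ⊢; omega)]
    simp
    omega

lemma pvFlushA_spec (st out : List Int) (k : Nat) (h : st.length ≤ k) :
    pvFlushA st (out.map some ++ List.replicate k none) (out.length : Int)
    = ((out ++ st.reverse).map some ++ List.replicate (k - st.length) none,
       (out.length : Int) + st.length) := by
  unfold pvFlushA
  rw [pvFlush_go st.reverse out k (by simpa using h)]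
  simp

-- loop invariant: after processing 1..m-1, A's res holds B's emitted prefix (as somes) followed by
-- blanks, A's stack is exactly the pending block start..m-1 (B's start marker), and j counts the prefix
lemma pvInv (cs : List Char) (n : Int) : ∀ m : Int, 1 ≤ m → m ≤ n →
    (PySem.List.pyRange 1 m 1).foldl (pvStepA cs) (List.replicate n.toNat none, [], 0)
      = (((PySem.List.pyRange 1 m 1).foldl (pvStepB cs) ([], 1)).1.map some
           ++ List.replicate (n.toNat - ((PySem.List.pyRange 1 m 1).foldl (pvStepB cs) ([], 1)).1.length) none,
         (PySem.List.pyRange (m - 1) (((PySem.List.pyRange 1 m 1).foldl (pvStepB cs) ([], 1)).2 - 1) (-1)).reverse,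
         (((PySem.List.pyRange 1 m 1).foldl (pvStepB cs) ([], 1)).1.length : Int))
    ∧ (((PySem.List.pyRange 1 m 1).foldl (pvStepB cs) ([], 1)).1.length : Int)
        = ((PySem.List.pyRange 1 m 1).foldl (pvStepB cs) ([], 1)).2 - 1
    ∧ 1 ≤ ((PySem.List.pyRange 1 m 1).foldl (pvStepB cs) ([], 1)).2
    ∧ ((PySem.List.pyRange 1 m 1).foldl (pvStepB cs) ([], 1)).2 ≤ m := by
  intro m hm
  induction m, hm using Int.le_induction with
  | base =>
    intro _
    rw [PySem.List.pyRange_one_eq_nil (by norm_num)]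
    simp
  | succ m hm ih =>
    intro hmn
    obtain ⟨hA, hlen, hge, hle⟩ := ih (by omega)
    rw [PySem.List.pyRange_one_succ_right (by omega : (1:Int) ≤ m)]
    simp only [List.foldl_append, List.foldl_cons, List.foldl_nil, hA]
    set t := (PySem.List.pyRange 1 m 1).foldl (pvStepB cs) ([], 1) with ht
    unfold pvStepA pvStepB
    have hstk : (PySem.List.pyRange (m - 1) (t.2 - 1) (-1)).reverse ++ [m]
        = (PySem.List.pyRange m (t.2 - 1) (-1)).reverse := by
      conv_rhs => rw [PySem.List.pyRange_neg_one_cons (show t.2 - 1 < m by omega)]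
      simp
    by_cases hc : (PySem.List.pyGetD cs (m - 1) 'D' == 'I') = true
    · simp only [hc, if_pos]
      rw [hstk]
      have hlenrange : (PySem.List.pyRange m (t.2 - 1) (-1)).length
          = (m - (t.2 - 1)).toNat := PySem.List.length_pyRange_neg_one m (t.2 - 1)
      have hsle : ((PySem.List.pyRange m (t.2 - 1) (-1)).reverse).length
          ≤ n.toNat - t.1.length := by
        simp [hlenrange]; omega
      rw [pvFlushA_spec _ t.1 _ hsle]
      simp only [List.reverse_reverse, List.length_reverse, hlenrange]
      refine ⟨?_, ?_, by omega, by omega⟩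
      · simp [hlenrange]
        omega
      · simp [hlenrange]; omega
    · simp only [Bool.not_eq_true] at hc
      simp only [hc, Bool.false_eq_true, if_false]
      rw [show m + 1 - 1 = m by ring, hstk]
      exact ⟨rfl, hlen, hge, by omega⟩

lemma pvFindPerm_eq (s : String) (n : Int) (hn : 1 ≤ n) : findPerm s n = findPerm_alt s n := by
  unfold findPerm findPerm_alt
  obtain ⟨hA, hlen, hge, hle⟩ := pvInv s.toList n n hn le_rfl
  simp only [hA]
  set t := (PySem.List.pyRange 1 n 1).foldl (pvStepB s.toList) ([], 1) with ht
  have hstk : (PySem.List.pyRange (n - 1) (t.2 - 1) (-1)).reverse ++ [n]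
      = (PySem.List.pyRange n (t.2 - 1) (-1)).reverse := by
    conv_rhs => rw [PySem.List.pyRange_neg_one_cons (show t.2 - 1 < n by omega)]
    simp
  have hlenrange : (PySem.List.pyRange n (t.2 - 1) (-1)).length
      = (n - (t.2 - 1)).toNat := PySem.List.length_pyRange_neg_one n (t.2 - 1)
  have hsle : ((PySem.List.pyRange n (t.2 - 1) (-1)).reverse).length
      ≤ n.toNat - t.1.length := by
    simp [hlenrange]; omega
  rw [hstk, pvFlushA_spec _ t.1 _ hsle]
  simp only [List.reverse_reverse, List.length_reverse, hlenrange]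
  have hz : n.toNat - t.1.length - (n - (t.2 - 1)).toNat = 0 := by omega
  rw [hz]
  simp

-- ===== VERDICT (by name: the statement is the Claim_ definition above) =====
theorem findPerm_spec : Claim_equal_findPerm := by
  intro s n _ hpre
  unfold Spec_findPerm
  exact pvFindPerm_eq s n hpre.1
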